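-- pv_equiv track=rewrite | github.com/Lyaminariya/diploma-work | stats_api/management/commands/fetch_valorant_data.py | get_rank_name
-- ===== SOURCE A (Python) =====
-- RANK_TIERS = {
--     "IRON": list(range(3, 6)),
--     "BRONZE": list(range(6, 9)),
--     "SILVER": list(range(9, 12)),
--     "GOLD": list(range(12, 15)),
--     "PLATINUM": list(range(15, 18)),
--     "DIAMOND": list(range(18, 21)),
--     "ASCENDANT": list(range(21, 24)),
--     "IMMORTAL": list(range(24, 27)),
--     "RADIANT": [27],
-- }
--
-- def get_rank_name(tier):
--     """Получает ранг из числа ранга"""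
--     if not isinstance(tier, int):
--         return "UNKNOWN"
--
--     for name, tiers in RANK_TIERS.items():
--         if tier in tiers:
--             return name
--
--     if tier < 3:
--         return "UNRANKED"
--     return "UNKNOWN"
-- ===== SOURCE B (Python) =====
-- RANK_NAMES = ["IRON", "BRONZE", "SILVER", "GOLD", "PLATINUM",
--               "DIAMOND", "ASCENDANT", "IMMORTAL", "RADIANT"]
--
-- def get_rank_name(tier):
--     """Получает ранг из числа ранга"""
--     if not isinstance(tier, int):
--         return "UNKNOWN"
--     if tier < 3:
--         return "UNRANKED"
--     if tier > 27:
--         return "UNKNOWN"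
--     return RANK_NAMES[(tier - 3) // 3]
-- ===== Notes on version B (the rewrite author's own statement) =====
-- stated objective: simpler
-- what changed: Replaces the per-rank membership scan over the RANK_TIERS dict with range checks plus a single arithmetic index (tier-3)//3 into a positional name list.
import Mathlib
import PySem

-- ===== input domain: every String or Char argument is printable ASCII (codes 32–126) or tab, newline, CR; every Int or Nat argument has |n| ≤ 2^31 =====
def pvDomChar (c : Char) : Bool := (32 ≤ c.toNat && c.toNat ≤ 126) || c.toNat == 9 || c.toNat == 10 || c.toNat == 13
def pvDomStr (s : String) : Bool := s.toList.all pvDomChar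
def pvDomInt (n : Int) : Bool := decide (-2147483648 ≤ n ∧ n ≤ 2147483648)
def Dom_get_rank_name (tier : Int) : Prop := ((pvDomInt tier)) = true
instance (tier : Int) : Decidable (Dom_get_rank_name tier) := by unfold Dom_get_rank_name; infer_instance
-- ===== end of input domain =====

-- B replaces A's per-rank membership scan with range checks and one arithmetic index (simpler).

-- ===== PORT A =====
-- RANK_TIERS dict as an association list in insertion order (list(range(a,b)) spelled out).
def rankTiers : List (String × List Int) :=
  [("IRON", [3, 4, 5]), ("BRONZE", [6, 7, 8]), ("SILVER", [9, 10, 11]),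
   ("GOLD", [12, 13, 14]), ("PLATINUM", [15, 16, 17]), ("DIAMOND", [18, 19, 20]),
   ("ASCENDANT", [21, 22, 23]), ("IMMORTAL", [24, 25, 26]), ("RADIANT", [27])]

-- the 'for name, tiers in RANK_TIERS.items(): if tier in tiers: return name' loop
def scanRanks (tier : Int) : List (String × List Int) → Option String
  | [] => none
  | (name, tiers) :: rest =>
      if tiers.contains tier then some name else scanRanks tier rest

def get_rank_name (tier : Int) : String :=
  match scanRanks tier rankTiers with
  | some name => name
  | none => if tier < 3 then "UNRANKED" else "UNKNOWN"

-- ===== PORT B =====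
def rankNames : List String :=
  ["IRON", "BRONZE", "SILVER", "GOLD", "PLATINUM", "DIAMOND", "ASCENDANT", "IMMORTAL", "RADIANT"]

def get_rank_name_alt (tier : Int) : String :=
  if tier < 3 then "UNRANKED"
  else if tier > 27 then "UNKNOWN"
  else (PySem.List.pyGet? rankNames (PySem.Int.floordiv (tier - 3) 3)).getD "UNKNOWN"
  -- the index is always in range for 3 ≤ tier ≤ 27, so the .getD default is never used

-- ===== PRECONDITION & SPEC =====
def Spec_get_rank_name (tier : Int) (out : String) : Prop := out = get_rank_name_alt tier
instance (tier : Int) (out : String) : Decidable (Spec_get_rank_name tier out) := by unfold Spec_get_rank_name; infer_instance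

-- ===== CLAIM (what is proved, stated in full; the proofs are below) =====
def Claim_equal_get_rank_name : Prop := ∀ (tier : Int), Dom_get_rank_name tier → Spec_get_rank_name tier (get_rank_name tier)

-- ===== LEMMAS AND PROOFS =====

theorem scan_lt_three (tier : Int) (h : tier < 3) : scanRanks tier rankTiers = none := by
  simp only [rankTiers, scanRanks, List.contains_cons, List.contains_nil]
  split_ifs with h1 h2 h3 h4 h5 h6 h7 h8 h9 <;>
    first | rfl | (exfalso; simp only [Bool.or_eq_true, beq_iff_eq, reduceCtorEq, or_false] at *; omega)

theorem scan_gt_27 (tier : Int) (h : 27 < tier) : scanRanks tier rankTiers = none := by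
  simp only [rankTiers, scanRanks, List.contains_cons, List.contains_nil]
  split_ifs with h1 h2 h3 h4 h5 h6 h7 h8 h9 <;>
    first | rfl | (exfalso; simp only [Bool.or_eq_true, beq_iff_eq, reduceCtorEq, or_false] at *; omega)

-- ===== VERDICT (by name: the statement is the Claim_ definition above) =====
theorem get_rank_name_spec : Claim_equal_get_rank_name := by
  intro tier _
  unfold Spec_get_rank_name
  by_cases h3 : tier < 3
  · simp [get_rank_name, get_rank_name_alt, scan_lt_three tier h3, h3]
  · by_cases h27 : 27 < tier
    · simp only [get_rank_name, scan_gt_27 tier h27]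
      simp [get_rank_name_alt, h3, h27]
    · -- 3 ≤ tier ≤ 27: finitely many cases
      interval_cases tier <;> decide
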